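-- pv_equiv track=rewrite | github.com/kungfuai/CVlization | examples/generative/video_generation/wan2gp/vendor/wan2gp/shared/utils/loras_mutipliers.py | _strip_bars_outside_comments
-- ===== SOURCE A (Python) =====
-- def _strip_bars_outside_comments(s: str) -> str:
--     com, out = False, []
--     for ch in s:
--         if ch in ('\n', '\r'): com = False; out.append(ch)
--         elif ch == '#':        com = True;  out.append(ch)
--         elif ch == '|' and not com: continue
--         else: out.append(ch)
--     return ''.join(out)
-- ===== SOURCE B (Python) =====
-- def _strip_bars_outside_comments(s: str) -> str:
--     # Segment-based scan: copy whole comment regions ('#' up to but not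
--     # including '\r'/'\n') verbatim, delete '|' elsewhere, keep the rest.
--     out = []
--     i, n = 0, len(s)
--     while i < n:
--         ch = s[i]
--         if ch == '#':
--             j = i
--             while j < n and s[j] not in '\r\n':
--                 j += 1
--             out.append(s[i:j])
--             i = j
--         elif ch == '|':
--             i += 1
--         else:
--             out.append(ch)
--             i += 1
--     return ''.join(out)
-- ===== Notes on version B (the rewrite author's own statement) =====
-- stated objective: alternative
-- what changed: Replaces the per-character boolean comment-flag state machine with a segment-based scan that copies each entire comment region ('#' up to the next CR/LF) in one inner scan/slice and deletes '|' only in the code segments.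
import Mathlib
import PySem

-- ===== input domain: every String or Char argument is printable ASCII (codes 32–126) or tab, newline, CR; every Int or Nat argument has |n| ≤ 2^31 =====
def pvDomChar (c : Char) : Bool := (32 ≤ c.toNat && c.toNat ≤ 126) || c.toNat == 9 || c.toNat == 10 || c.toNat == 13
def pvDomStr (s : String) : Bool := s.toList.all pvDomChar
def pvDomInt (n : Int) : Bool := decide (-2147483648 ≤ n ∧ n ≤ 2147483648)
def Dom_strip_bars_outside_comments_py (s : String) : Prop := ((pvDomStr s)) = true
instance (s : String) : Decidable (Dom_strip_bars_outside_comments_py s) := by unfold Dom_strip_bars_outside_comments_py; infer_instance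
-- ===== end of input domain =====

-- B replaces A's per-character comment-flag state machine with a segment-based
-- scan that copies whole comment regions at once (alternative, same cost).

-- ===== PORT A =====
-- A's loop: state (com, out); each char appended or skipped per the branch order.
def stripBarsStepA (st : Bool × List Char) (ch : Char) : Bool × List Char :=
  if ch = '\n' ∨ ch = '\r' then (false, st.2 ++ [ch])
  else if ch = '#' then (true, st.2 ++ [ch])
  else if ch = '|' ∧ st.1 = false then st
  else (st.1, st.2 ++ [ch])

def strip_bars_outside_comments_py (s : String) : String :=
  String.mk (s.toList.foldl stripBarsStepA (false, [])).2

-- ===== PORT B =====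
-- Source B's outer while loop; the inner 'while s[j] not in "\r\n"' scan is the
-- takeWhile/dropWhile split, the appended slice s[i:j] is the takeWhile chunk.
def stripBarsNotNL (c : Char) : Bool := c ≠ '\r' && c ≠ '\n'

def stripBarsAltGo : List Char → List Char
  | [] => []
  | c :: rest =>
    if c = '#' then
      (c :: rest.takeWhile stripBarsNotNL) ++ stripBarsAltGo (rest.dropWhile stripBarsNotNL)
    else if c = '|' then stripBarsAltGo rest
    else c :: stripBarsAltGo rest
termination_by l => l.length
decreasing_by
  · exact Nat.lt_succ_of_le (List.length_dropWhile_le _ _)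
  · simp
  · simp

def strip_bars_outside_comments_py_alt (s : String) : String :=
  String.mk (stripBarsAltGo s.toList)

-- ===== PRECONDITION & SPEC =====
def Spec_strip_bars_outside_comments_py (s : String) (out : String) : Prop := out = strip_bars_outside_comments_py_alt s
instance (s : String) (out : String) : Decidable (Spec_strip_bars_outside_comments_py s out) := by unfold Spec_strip_bars_outside_comments_py; infer_instance

-- ===== CLAIM (what is proved, stated in full; the proofs are below) =====
def Claim_equal_strip_bars_outside_comments_py : Prop := ∀ (s : String), Dom_strip_bars_outside_comments_py s → Spec_strip_bars_outside_comments_py s (strip_bars_outside_comments_py s)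

-- ===== LEMMAS AND PROOFS =====

-- The emitted characters of A's state machine starting in state `com`.
def stripBarsG (com : Bool) : List Char → List Char
  | [] => []
  | ch :: rest =>
    if ch = '\n' ∨ ch = '\r' then ch :: stripBarsG false rest
    else if ch = '#' then ch :: stripBarsG true rest
    else if ch = '|' ∧ com = false then stripBarsG com rest
    else ch :: stripBarsG com rest

theorem stripBars_foldl_eq (l : List Char) : ∀ (com : Bool) (acc : List Char),
    (l.foldl stripBarsStepA (com, acc)).2 = acc ++ stripBarsG com l := by
  induction l with
  | nil => intro com acc; simp [stripBarsG]
  | cons ch rest ih =>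
    intro com acc
    simp only [List.foldl_cons, stripBarsStepA, stripBarsG]
    split_ifs with h1 h2 h3
    · simp [ih]
    · simp [ih]
    · simp [h3.2, ih]
    · simp [ih]

theorem stripBarsG_true (l : List Char) :
    stripBarsG true l = l.takeWhile stripBarsNotNL ++ stripBarsG false (l.dropWhile stripBarsNotNL) := by
  induction l with
  | nil => simp [stripBarsG]
  | cons ch rest ih =>
    by_cases hnl : ch = '\n' ∨ ch = '\r'
    · have : stripBarsNotNL ch = false := by
        rcases hnl with h | h <;> simp [h, stripBarsNotNL]
      simp [stripBarsG, hnl, List.takeWhile_cons, List.dropWhile_cons, this]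
    · have hne : stripBarsNotNL ch = true := by
        push_neg at hnl
        simp [stripBarsNotNL, hnl.1, hnl.2]
      push_neg at hnl
      by_cases hh : ch = '#'
      · simp [stripBarsG, hh, List.takeWhile_cons, List.dropWhile_cons, stripBarsNotNL, ih]
      · simp [stripBarsG, hnl.1, hnl.2, hh, List.takeWhile_cons, List.dropWhile_cons, hne, ih]

theorem stripBarsG_false (l : List Char) : stripBarsG false l = stripBarsAltGo l := by
  induction l using stripBarsAltGo.induct with
  | case1 => simp [stripBarsG, stripBarsAltGo]
  | case2 rest ih =>
    have : ¬ (('#' : Char) = '\n' ∨ ('#' : Char) = '\r') := by decide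
    simp [stripBarsG, stripBarsAltGo, this, stripBarsG_true, ih]
  | case3 rest h1 ih =>
    simp_all [stripBarsG, stripBarsAltGo]
  | case4 c rest h1 h2 ih =>
    by_cases hnl : c = '\n' ∨ c = '\r'
    · simp [stripBarsG, stripBarsAltGo, hnl, h1, h2, ih]
    · simp [stripBarsG, stripBarsAltGo, hnl, h1, h2, ih]

-- ===== VERDICT (by name: the statement is the Claim_ definition above) =====
theorem strip_bars_outside_comments_py_spec : Claim_equal_strip_bars_outside_comments_py := by
  intro s _
  unfold Spec_strip_bars_outside_comments_py strip_bars_outside_comments_py strip_bars_outside_comments_py_alt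
  rw [stripBars_foldl_eq, stripBarsG_false]
  simp
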